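-- pv_equiv track=rewrite | github.com/MrBrantCode/unitest_baseline | mut_generate/mist_train_taco/taco_679/solution.py | calculate_final_balances
-- ===== SOURCE A (Python) =====
-- def calculate_final_balances(n, initial_balances, events):
--     last_updated = [0] * n
--     pay_days = [0] * len(events)
--
--     for i, event in enumerate(events):
--         if event[0] == 1:
--             _, p, x = event
--             initial_balances[p - 1] = x
--             last_updated[p - 1] = i
--         else:
--             _, x = event
--             pay_days[i] = x
--
--     for i in range(len(events) - 1):
--         pay_days[len(events) - i - 2] = max(pay_days[len(events) - i - 1], pay_days[len(events) - i - 2])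
--
--     final_balances = [max(initial_balances[i], pay_days[last_updated[i]]) for i in range(n)]
--
--     return final_balances
-- ===== SOURCE B (Python) =====
-- def calculate_final_balances(n, initial_balances, events):
--     # Single reverse pass: maintain the running suffix maximum of pay-day values
--     # (type-1 positions count as 0), and fill each person's final balance at the
--     # LAST update event we meet first in reverse.  Matches A's return value and
--     # A's in-place update of initial_balances (last write per person wins).
--     run = None  # suffix maximum so far; None = nothing to the right
--     seen = [False] * n
--     final = [0] * n
--     for event in reversed(events):
--         if event[0] == 1:
--             _, p, x = event
--             val = 0 if run is None else max(run, 0)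
--             if not seen[p - 1]:
--                 seen[p - 1] = True
--                 final[p - 1] = max(x, val)
--                 initial_balances[p - 1] = x
--             run = val
--         else:
--             _, x = event
--             run = x if run is None else max(run, x)
--     return [final[i] if seen[i] else
--             (initial_balances[i] if run is None else max(initial_balances[i], run))
--             for i in range(n)]
-- ===== Notes on version B (the rewrite author's own statement) =====
-- stated objective: alternative
-- what changed: A's three passes (forward event scan filling last_updated/pay_days arrays, backward suffix-max pass over pay_days, final comprehension indexing pay_days by last_updated) are replaced by one reverse pass over events that maintains the running suffix maximum and fixes each person's final balance at their last update, dropping the pay_days and last_updated arrays.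
-- outside the precondition, e.g. on calculate_final_balances(2, [5, 6], [[1, 0, 7]]): A returns [5, 7], B returns [5, 7]
import Mathlib
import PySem

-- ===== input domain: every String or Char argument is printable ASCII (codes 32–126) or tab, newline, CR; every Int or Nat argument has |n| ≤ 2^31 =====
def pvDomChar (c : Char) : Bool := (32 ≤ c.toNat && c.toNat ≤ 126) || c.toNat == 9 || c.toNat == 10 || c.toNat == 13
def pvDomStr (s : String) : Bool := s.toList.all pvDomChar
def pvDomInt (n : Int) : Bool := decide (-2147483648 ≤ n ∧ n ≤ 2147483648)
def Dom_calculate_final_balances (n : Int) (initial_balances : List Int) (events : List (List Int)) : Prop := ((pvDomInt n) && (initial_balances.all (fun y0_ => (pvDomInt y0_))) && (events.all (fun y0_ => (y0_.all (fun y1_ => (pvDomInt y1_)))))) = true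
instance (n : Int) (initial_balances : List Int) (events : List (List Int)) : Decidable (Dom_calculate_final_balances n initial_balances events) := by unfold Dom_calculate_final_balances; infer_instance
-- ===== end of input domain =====

-- B replaces A's three passes (forward scan filling last_updated/pay_days, backward
-- suffix-max pass, final comprehension) by ONE reverse pass over events keeping a running
-- suffix maximum; equivalence is about the RETURN value (B also reproduces A's in-place
-- update of initial_balances, which is not modelled here).

-- ===== PORT A =====
-- first loop: for i, event in enumerate(events): fill initial_balances / last_updated / pay_days
def pvALoop1 : List (Int × List Int) → List Int × List Int × List Int → List Int × List Int × List Int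
  | [], s => s
  | (i, e) :: rest, (ib, lu, pd) =>
    if PySem.List.pyGetD e 0 0 = 1 then
      match e with
      | [_, p, x] => pvALoop1 rest (PySem.List.pySetD ib (p - 1) x, PySem.List.pySetD lu (p - 1) i, pd)
      | _ => (ib, lu, pd)          -- Python raises here (unpacking fails); outside Pre_
    else
      match e with
      | [_, x] => pvALoop1 rest (ib, lu, PySem.List.pySetD pd i x)
      | _ => (ib, lu, pd)          -- Python raises here (unpacking fails); outside Pre_

-- one step of the second loop: pay_days[L-i-2] = max(pay_days[L-i-1], pay_days[L-i-2])
def pvAStep (L : Int) (pd : List Int) (i : Int) : List Int :=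
  PySem.List.pySetD pd (L - i - 2) (max (PySem.List.pyGetD pd (L - i - 1) 0) (PySem.List.pyGetD pd (L - i - 2) 0))

def calculate_final_balances (n : Int) (initial_balances : List Int) (events : List (List Int)) : List Int :=
  let lu0 : List Int := List.replicate n.toNat 0
  let pd0 : List Int := List.replicate events.length 0
  match pvALoop1 (PySem.List.enumerate events 0) (initial_balances, lu0, pd0) with
  | (ib', lu', pd') =>
    let L : Int := events.length
    let pd2 := (PySem.List.pyRange 0 (L - 1) 1).foldl (pvAStep L) pd'
    (PySem.List.pyRange 0 n 1).map (fun i =>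
      max (PySem.List.pyGetD ib' i 0) (PySem.List.pyGetD pd2 (PySem.List.pyGetD lu' i 0) 0))

-- ===== PORT B =====
def pvBStep (s : Option Int × List Bool × List Int × List Int) (e : List Int) :
    Option Int × List Bool × List Int × List Int :=
  match s with
  | (run, seen, final, ib) =>
    if PySem.List.pyGetD e 0 0 = 1 then
      match e with
      | [_, p, x] =>
        let val : Int := match run with | none => 0 | some r => max r 0
        if PySem.List.pyGetD seen (p - 1) false then (some val, seen, final, ib)
        else (some val, PySem.List.pySetD seen (p - 1) true,
              PySem.List.pySetD final (p - 1) (max x val), PySem.List.pySetD ib (p - 1) x)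
      | _ => s                     -- Python raises here (unpacking fails); outside Pre_
    else
      match e with
      | [_, x] => ((some (match run with | none => x | some r => max r x)), seen, final, ib)
      | _ => s                     -- Python raises here (unpacking fails); outside Pre_

def calculate_final_balances_alt (n : Int) (initial_balances : List Int) (events : List (List Int)) : List Int :=
  match events.reverse.foldl pvBStep
      (none, List.replicate n.toNat false, List.replicate n.toNat 0, initial_balances) with
  | (run, seen, final, ib') =>
    (PySem.List.pyRange 0 n 1).map (fun i =>
      if PySem.List.pyGetD seen i false then PySem.List.pyGetD final i 0
      else match run with
           | none => PySem.List.pyGetD ib' i 0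
           | some r => max (PySem.List.pyGetD ib' i 0) r)

-- ===== PRECONDITION & SPEC =====
-- a well-formed event: an update [1, p, x] with 1 ≤ p ≤ n, or a pay-day [t, x] with t ≠ 1
def pvWFev (n : Int) (e : List Int) : Prop :=
  (e.length = 3 ∧ e.getD 0 0 = 1 ∧ 1 ≤ e.getD 1 0 ∧ e.getD 1 0 ≤ n) ∨
  (e.length = 2 ∧ e.getD 0 0 ≠ 1)

-- Pre_ excludes malformed events and person indices outside 1..n (A raises on most of them and
-- relies on Python's negative-index wraparound on the rest), n > len(initial_balances)
-- (IndexError in the final comprehension) and events = [] with n > 0 (IndexError on pay_days[0]).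
def Pre_calculate_final_balances (n : Int) (initial_balances : List Int) (events : List (List Int)) : Prop :=
  n ≤ (initial_balances.length : Int) ∧ (events = [] → n ≤ 0) ∧ ∀ e ∈ events, pvWFev n e

instance (n : Int) (initial_balances : List Int) (events : List (List Int)) : Decidable (Pre_calculate_final_balances n initial_balances events) := by unfold Pre_calculate_final_balances pvWFev; infer_instance

def pvWitness_calculate_final_balances : Int × List Int × List (List Int) :=
  (2, [10, 20], [[2, 5], [1, 1, 3], [2, 4]])

def Spec_calculate_final_balances (n : Int) (initial_balances : List Int) (events : List (List Int)) (out : List Int) : Prop := out = calculate_final_balances_alt n initial_balances events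
instance (n : Int) (initial_balances : List Int) (events : List (List Int)) (out : List Int) : Decidable (Spec_calculate_final_balances n initial_balances events out) := by unfold Spec_calculate_final_balances; infer_instance

-- ===== CLAIM (what is proved, stated in full; the proofs are below) =====
def Claim_equal_calculate_final_balances : Prop := ∀ (n : Int) (initial_balances : List Int) (events : List (List Int)), Dom_calculate_final_balances n initial_balances events → Pre_calculate_final_balances n initial_balances events → Spec_calculate_final_balances n initial_balances events (calculate_final_balances n initial_balances events)

-- ===== LEMMAS AND PROOFS =====

-- value position j contributes to the suffix maxima: a pay-day keeps its amount, an update counts 0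
def pvPd (e : List Int) : Int := if e.getD 0 0 = 1 then 0 else e.getD 1 0

-- maximum of a list of ints, none on []
def pvM : List Int → Option Int
  | [] => none
  | a :: r => some (max a ((pvM r).getD a))

-- index of the LAST update event for person p, if any
def pvLastIdx : List (List Int) → Int → Option Nat
  | [], _ => none
  | e :: rest, p =>
    match pvLastIdx rest p with
    | some j => some (j + 1)
    | none => if e.getD 0 0 = 1 ∧ e.getD 1 0 = p then some 0 else none

-- the common value both programs compute for person q+1
def pvSpecAt (events : List (List Int)) (ib : List Int) (q : Nat) : Int :=
  match pvLastIdx events ((q : Int) + 1) with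
  | some j => max ((events.getD j []).getD 2 0)
                  (max 0 ((pvM ((events.drop (j + 1)).map pvPd)).getD 0))
  | none => max (ib.getD q 0) ((pvM (events.map pvPd)).getD 0)

-- suffix maxima, structurally
def pvSmax : List Int → List Int
  | [] => []
  | a :: r => max a ((pvSmax r).headD a) :: pvSmax r

lemma pvLastIdx_lt {events : List (List Int)} {p : Int} {j : Nat}
    (h : pvLastIdx events p = some j) : j < events.length := by
  induction events generalizing j with
  | nil => simp [pvLastIdx] at h
  | cons e rest ih =>
    rw [pvLastIdx] at h
    cases h' : pvLastIdx rest p with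
    | some j' => rw [h'] at h; simp at h; have := ih h'; simp; omega
    | none =>
      rw [h'] at h; simp at h
      obtain ⟨-, hj⟩ := h
      simp; omega

lemma pvLastIdx_head1 {events : List (List Int)} {p : Int} {j : Nat}
    (h : pvLastIdx events p = some j) : (events.getD j []).getD 0 0 = 1 := by
  induction events generalizing j with
  | nil => simp [pvLastIdx] at h
  | cons e rest ih =>
    rw [pvLastIdx] at h
    cases h' : pvLastIdx rest p with
    | some j' => rw [h'] at h; simp at h; subst h; simpa using ih h'
    | none =>
      rw [h'] at h; simp at h
      obtain ⟨hc, hj⟩ := h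
      have hj0 : j = 0 := hj.symm
      subst hj0
      simpa using hc.1

lemma pvSmax_ne_nil {pd : List Int} (h : pd ≠ []) : pvSmax pd ≠ [] := by
  cases pd with
  | nil => simp at h
  | cons a r => simp [pvSmax]

lemma pvSmax_headD {pd : List Int} (h : pd ≠ []) (c : Int) :
    (pvSmax pd).headD c = (pvM pd).getD c := by
  induction pd generalizing c with
  | nil => simp at h
  | cons a r ih =>
    by_cases hr : r = []
    · subst hr; simp [pvSmax, pvM]
    · simp only [pvSmax, pvM, List.headD_cons, Option.getD_some]
      rw [ih hr]

lemma pvSmax_getD (pd : List Int) (j : Nat) (h : j < pd.length) :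
    (pvSmax pd).getD j 0 = (pvM (pd.drop j)).getD 0 := by
  induction pd generalizing j with
  | nil => simp at h
  | cons a r ih =>
    cases j with
    | zero =>
      by_cases hr : r = []
      · subst hr; simp [pvSmax, pvM]
      · simp only [pvSmax, pvM, List.getD_cons_zero, List.drop_zero, Option.getD_some]
        rw [pvSmax_headD hr]
    | succ j =>
      simp only [pvSmax, List.getD_cons_succ, List.drop_succ_cons]
      exact ih j (by simpa using Nat.lt_of_succ_lt_succ h)

lemma pyGetD_cons_pos (a d i: Int) (xs : List Int) (h : 1 ≤ i) : PySem.List.pyGetD (a::xs) i d = PySem.List.pyGetD xs (i-1) d := by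
  rw [PySem.List.pyGetD_of_nonneg, PySem.List.pyGetD_of_nonneg]
  · have : i.toNat = (i-1).toNat + 1 := by omega
    rw [this, List.getD_cons_succ]
  all_goals omega

lemma pySetD_cons_pos (a v i: Int) (xs : List Int) (h : 1 ≤ i) : PySem.List.pySetD (a::xs) i v = a :: PySem.List.pySetD xs (i-1) v := by
  rw [PySem.List.pySetD_of_nonneg _ _ (by omega : (0:Int) ≤ i), PySem.List.pySetD_of_nonneg _ _ (by omega : (0:Int) ≤ i - 1)]
  have : i.toNat = (i-1).toNat + 1 := by omega
  rw [this, List.set_cons_succ]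

lemma length_pvAStep (L : Int) (pd : List Int) (i : Int) : (pvAStep L pd i).length = pd.length := by
  simp [pvAStep, PySem.List.length_pySetD]

lemma pvAStep_cons (l : List Int) : ∀ (a : Int) (pd : List Int),
    (∀ i ∈ l, 0 ≤ i ∧ i + 3 ≤ (pd.length : Int) + 1) →
    l.foldl (pvAStep ((pd.length : Int) + 1)) (a :: pd) =
      a :: l.foldl (pvAStep (pd.length : Int)) pd := by
  induction l with
  | nil => intro a pd _; simp
  | cons i l ih =>
    intro a pd hb
    obtain ⟨h0, h3⟩ := hb i (by simp)
    have hstep : pvAStep ((pd.length : Int) + 1) (a :: pd) i = a :: pvAStep (pd.length : Int) pd i := by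
      unfold pvAStep
      rw [pyGetD_cons_pos _ _ _ _ (by omega), pyGetD_cons_pos _ _ _ _ (by omega),
          pySetD_cons_pos _ _ _ _ (by omega)]
      ring_nf
    rw [List.foldl_cons, List.foldl_cons, hstep]
    have := ih a (pvAStep (pd.length : Int) pd i) (by
      intro x hx
      have := hb x (by simp [hx])
      simpa [length_pvAStep] using this)
    simpa [length_pvAStep] using this

lemma pvALoop2_eq_smax : ∀ (pd : List Int),
    (PySem.List.pyRange 0 ((pd.length : Int) - 1) 1).foldl (pvAStep (pd.length : Int)) pd = pvSmax pd := by
  intro pd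
  induction pd with
  | nil => simp [PySem.List.pyRange_one_eq_nil (by norm_num : (-1:Int) ≤ 0), pvSmax]
  | cons a pd ih =>
    by_cases hpd : pd = []
    · subst hpd
      simp [PySem.List.pyRange_one_eq_nil (by norm_num : (0:Int) ≤ 0), pvSmax]
    · have hlen : 1 ≤ pd.length := by cases pd <;> simp_all
      have hL : ((a :: pd).length : Int) = (pd.length : Int) + 1 := by simp
      have hsplit : PySem.List.pyRange 0 (((a :: pd).length : Int) - 1) 1
          = PySem.List.pyRange 0 ((pd.length : Int) - 1) 1 ++ [(pd.length : Int) - 1] := by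
        rw [hL]
        have : (pd.length : Int) + 1 - 1 = ((pd.length : Int) - 1) + 1 := by ring
        rw [this, PySem.List.pyRange_one_succ_right (by omega)]
      rw [hsplit, List.foldl_append]
      have hinner : (PySem.List.pyRange 0 ((pd.length : Int) - 1) 1).foldl
            (pvAStep ((a :: pd).length : Int)) (a :: pd)
          = a :: pvSmax pd := by
        rw [hL]
        rw [pvAStep_cons _ a pd (by
          intro x hx
          rw [PySem.List.mem_pyRange_one] at hx
          omega)]
        rw [ih]
      rw [hinner]
      simp only [List.foldl_cons, List.foldl_nil]
      have hsm : pvSmax pd ≠ [] := pvSmax_ne_nil hpd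
      unfold pvAStep
      have e1 : ((a :: pd).length : Int) - ((pd.length : Int) - 1) - 2 = 0 := by simp
      have e2 : ((a :: pd).length : Int) - ((pd.length : Int) - 1) - 1 = 1 := by simp
      rw [e1, e2]
      rw [pyGetD_cons_pos _ _ _ _ (by omega)]
      have hget : PySem.List.pyGetD (pvSmax pd) (1 - 1) 0 = (pvSmax pd).headD a := by
        rw [PySem.List.pyGetD_of_nonneg]
        · cases hsm' : pvSmax pd with
          | nil => exact absurd hsm' hsm
          | cons b r => simp
        · omega
      rw [hget]
      rw [PySem.List.pySetD_of_nonneg _ _ (by omega : (0:Int) ≤ 0)]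
      cases hsm' : pvSmax pd with
      | nil => exact absurd hsm' hsm
      | cons b r =>
        simp only [pvSmax]
        rw [← hsm']
        simp [hsm', PySem.List.pyGetD_zero_cons, max_comm]

lemma getD_set_self {α : Type} (l : List α) (n : Nat) (v d : α) (h : n < l.length) : (l.set n v).getD n d = v := by
  simp [List.getD, h]

lemma getD_set_ne {α : Type} (l : List α) (n m : Nat) (v d : α) (h : m ≠ n) : (l.set n v).getD m d = l.getD m d := by
  rw [List.getD, List.getD, List.getElem?_set_ne (by omega)]

lemma set_append_mid (front rest : List Int) (y x : Int) :
    (front ++ y :: rest).set front.length x = front ++ x :: rest := by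
  rw [List.set_append_right _ _ (by omega)]
  simp

lemma pvALoop1_char (n : Int) : ∀ (events : List (List Int)) (i0 : Int) (ib lu front : List Int),
    (∀ e ∈ events, pvWFev n e) → 0 ≤ i0 → n ≤ (ib.length : Int) → n ≤ (lu.length : Int) →
    (front.length : Int) = i0 →
    (pvALoop1 (PySem.List.enumerate events i0) (ib, lu, front ++ List.replicate events.length 0)).2.2
        = front ++ events.map pvPd
    ∧ ∀ q : Nat, (q : Int) < n →
      ((pvALoop1 (PySem.List.enumerate events i0) (ib, lu, front ++ List.replicate events.length 0)).1.getD q 0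
          = match pvLastIdx events ((q : Int) + 1) with
            | some j => (events.getD j []).getD 2 0
            | none => ib.getD q 0)
      ∧ ((pvALoop1 (PySem.List.enumerate events i0) (ib, lu, front ++ List.replicate events.length 0)).2.1.getD q 0
          = match pvLastIdx events ((q : Int) + 1) with
            | some j => i0 + (j : Int)
            | none => lu.getD q 0) := by
  intro events
  induction events with
  | nil =>
    intro i0 ib lu front _ _ _ _ _
    simp [PySem.List.enumerate_nil, pvALoop1, pvLastIdx]
  | cons e rest ih =>
    intro i0 ib lu front hwf hi0 hib hlu hfl
    have he := hwf e (by simp)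
    rw [PySem.List.enumerate_cons]
    rcases he with ⟨hlen3, h0, hp1, hpn⟩ | ⟨hlen2, h0⟩
    · -- type-1 event e = [1, p, x]
      rcases e with _ | ⟨t, _ | ⟨p, _ | ⟨x, _ | _⟩⟩⟩ <;> simp at hlen3
      have ht : t = 1 := by simpa using h0
      subst ht
      have hp1' : 1 ≤ p := by simpa using hp1
      have hpn' : p ≤ n := by simpa using hpn
      have hstep : pvALoop1 (((i0, [1, p, x]) : Int × List Int) :: PySem.List.enumerate rest (i0 + 1))
            (ib, lu, front ++ List.replicate (([1, p, x] :: rest).length) 0)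
          = pvALoop1 (PySem.List.enumerate rest (i0 + 1))
            (PySem.List.pySetD ib (p - 1) x, PySem.List.pySetD lu (p - 1) i0,
             front ++ List.replicate (([1, p, x] :: rest).length) 0) := by
        rw [pvALoop1]
        simp [PySem.List.pyGetD_zero_cons]
      have hrepl : front ++ List.replicate (([1, p, x] :: rest).length) 0
          = (front ++ [(0:Int)]) ++ List.replicate rest.length 0 := by
        simp [List.replicate_succ]
      have hib1 : n ≤ ((PySem.List.pySetD ib (p - 1) x).length : Int) := by
        rw [PySem.List.length_pySetD]; exact hib
      have hlu1 : n ≤ ((PySem.List.pySetD lu (p - 1) i0).length : Int) := by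
        rw [PySem.List.length_pySetD]; exact hlu
      have hfl1 : (((front ++ [(0:Int)]).length : Nat) : Int) = i0 + 1 := by
        simp; omega
      obtain ⟨ihpd, ihq⟩ := ih (i0 + 1) (PySem.List.pySetD ib (p - 1) x)
        (PySem.List.pySetD lu (p - 1) i0) (front ++ [0])
        (fun e' he' => hwf e' (by simp [he'])) (by omega) hib1 hlu1 hfl1
      rw [hrepl] at hstep
      constructor
      · rw [hrepl, hstep, ihpd]
        simp [pvPd]
      · intro q hq
        have hqib : q < ib.length := by omega
        have hqlu : q < lu.length := by omega
        have hsetib : PySem.List.pySetD ib (p - 1) x = ib.set (p - 1).toNat x :=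
          PySem.List.pySetD_of_nonneg _ _ (by omega)
        have hsetlu : PySem.List.pySetD lu (p - 1) i0 = lu.set (p - 1).toNat i0 :=
          PySem.List.pySetD_of_nonneg _ _ (by omega)
        obtain ⟨ihq1, ihq2⟩ := ihq q hq
        rw [hrepl, hstep]
        cases hli : pvLastIdx rest ((q : Int) + 1) with
        | some j =>
          have hcons : pvLastIdx ([1, p, x] :: rest) ((q : Int) + 1) = some (j + 1) := by
            rw [pvLastIdx, hli]
          rw [hcons]
          rw [hli] at ihq1 ihq2
          constructor
          · rw [ihq1]; simp
          · rw [ihq2]; push_cast; ring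
        | none =>
          rw [hli] at ihq1 ihq2
          by_cases hpq : p = (q : Int) + 1
          · have hcons : pvLastIdx ([1, p, x] :: rest) ((q : Int) + 1) = some 0 := by
              rw [pvLastIdx, hli]
              simp [hpq]
            rw [hcons]
            have hidx : (p - 1).toNat = q := by omega
            constructor
            · rw [ihq1, hsetib, hidx, getD_set_self _ _ _ _ hqib]; simp
            · rw [ihq2, hsetlu, hidx, getD_set_self _ _ _ _ hqlu]; simp
          · have hcons : pvLastIdx ([1, p, x] :: rest) ((q : Int) + 1) = none := by
              rw [pvLastIdx, hli]
              simp [hpq]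
            rw [hcons]
            have hne : q ≠ (p - 1).toNat := by omega
            constructor
            · rw [ihq1, hsetib, getD_set_ne _ _ _ _ _ hne]
            · rw [ihq2, hsetlu, getD_set_ne _ _ _ _ _ hne]
    · -- type-2 event e = [t, x] with t ≠ 1
      rcases e with _ | ⟨t, _ | ⟨x, _ | _⟩⟩ <;> simp at hlen2
      have ht : t ≠ 1 := by simpa using h0
      have hstep : pvALoop1 (((i0, [t, x]) : Int × List Int) :: PySem.List.enumerate rest (i0 + 1))
            (ib, lu, front ++ List.replicate (([t, x] :: rest).length) 0)
          = pvALoop1 (PySem.List.enumerate rest (i0 + 1))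
            (ib, lu, PySem.List.pySetD (front ++ List.replicate (([t, x] :: rest).length) 0) i0 x) := by
        rw [pvALoop1]
        simp [PySem.List.pyGetD_zero_cons, ht]
      have hset : PySem.List.pySetD (front ++ List.replicate (([t, x] :: rest).length) 0) i0 x
          = (front ++ [x]) ++ List.replicate rest.length 0 := by
        rw [PySem.List.pySetD_of_nonneg _ _ hi0]
        have : i0.toNat = front.length := by omega
        rw [this]
        simp only [List.length_cons, List.replicate_succ]
        rw [set_append_mid]
        simp
      rw [hset] at hstep
      have hfl1 : (((front ++ [x]).length : Nat) : Int) = i0 + 1 := by simp; omega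
      obtain ⟨ihpd, ihq⟩ := ih (i0 + 1) ib lu (front ++ [x])
        (fun e' he' => hwf e' (by simp [he'])) (by omega) hib hlu hfl1
      constructor
      · rw [hstep, ihpd]
        simp [pvPd, ht]
      · intro q hq
        obtain ⟨ihq1, ihq2⟩ := ihq q hq
        rw [hstep]
        have hcons : pvLastIdx ([t, x] :: rest) ((q : Int) + 1)
            = match pvLastIdx rest ((q : Int) + 1) with
              | some j => some (j + 1)
              | none => none := by
          rw [pvLastIdx]
          cases pvLastIdx rest ((q : Int) + 1) with
          | some j => rfl
          | none => simp [ht]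
        cases hli : pvLastIdx rest ((q : Int) + 1) with
        | some j =>
          rw [hli] at ihq1 ihq2 hcons
          rw [hcons]
          constructor
          · rw [ihq1]; simp
          · rw [ihq2]; push_cast; ring
        | none =>
          rw [hli] at ihq1 ihq2 hcons
          rw [hcons]
          exact ⟨ihq1, ihq2⟩

lemma pvBLoop_char (n : Int) (ib0 : List Int) : ∀ (events : List (List Int)),
    (∀ e ∈ events, pvWFev n e) →
    (events.reverse.foldl pvBStep
        (none, List.replicate n.toNat false, List.replicate n.toNat 0, ib0)).1
      = pvM (events.map pvPd)
    ∧ (events.reverse.foldl pvBStep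
        (none, List.replicate n.toNat false, List.replicate n.toNat 0, ib0)).2.1.length = n.toNat
    ∧ (events.reverse.foldl pvBStep
        (none, List.replicate n.toNat false, List.replicate n.toNat 0, ib0)).2.2.1.length = n.toNat
    ∧ (events.reverse.foldl pvBStep
        (none, List.replicate n.toNat false, List.replicate n.toNat 0, ib0)).2.2.2.length = ib0.length
    ∧ ∀ q : Nat, (q : Int) < n →
      ((events.reverse.foldl pvBStep
          (none, List.replicate n.toNat false, List.replicate n.toNat 0, ib0)).2.1.getD q false
        = (pvLastIdx events ((q : Int) + 1)).isSome)
      ∧ (∀ j, pvLastIdx events ((q : Int) + 1) = some j →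
          (events.reverse.foldl pvBStep
            (none, List.replicate n.toNat false, List.replicate n.toNat 0, ib0)).2.2.1.getD q 0
          = max ((events.getD j []).getD 2 0)
                (max 0 ((pvM ((events.drop (j + 1)).map pvPd)).getD 0)))
      ∧ (pvLastIdx events ((q : Int) + 1) = none →
          (events.reverse.foldl pvBStep
            (none, List.replicate n.toNat false, List.replicate n.toNat 0, ib0)).2.2.2.getD q 0
          = ib0.getD q 0) := by
  intro events
  induction events with
  | nil =>
    intro _
    refine ⟨by simp [pvM], by simp, by simp, by simp, ?_⟩
    intro q hq
    exact ⟨by simp [pvLastIdx], by simp [pvLastIdx], by intro _; simp⟩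
  | cons e rest ih =>
    intro hwf
    obtain ⟨ihr, ihsl, ihfl, ihil, ihq⟩ := ih (fun e' he' => hwf e' (by simp [he']))
    have hsplit : (e :: rest).reverse.foldl pvBStep
          (none, List.replicate n.toNat false, List.replicate n.toNat 0, ib0)
        = pvBStep (rest.reverse.foldl pvBStep
            (none, List.replicate n.toNat false, List.replicate n.toNat 0, ib0)) e := by
      rw [List.reverse_cons, List.foldl_append, List.foldl_cons, List.foldl_nil]
    rcases hres : rest.reverse.foldl pvBStep
        (none, List.replicate n.toNat false, List.replicate n.toNat 0, ib0) with ⟨run, seen, final, ib1⟩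
    rw [hres] at hsplit ihr ihsl ihfl ihil ihq
    simp only at ihr ihsl ihfl ihil ihq
    subst ihr
    have he := hwf e (by simp)
    rcases he with ⟨hlen3, h0, hp1, hpn⟩ | ⟨hlen2, h0⟩
    · -- type-1 event e = [1, p, x]
      rcases e with _ | ⟨t, _ | ⟨p, _ | ⟨x, _ | _⟩⟩⟩ <;> simp at hlen3
      have ht : t = 1 := by simpa using h0
      subst ht
      have hp1' : 1 ≤ p := by simpa using hp1
      have hpn' : p ≤ n := by simpa using hpn
      have hq0n : (((p - 1).toNat : Int)) < n := by omega
      have hq0p : (((p - 1).toNat : Int)) + 1 = p := by omega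
      obtain ⟨ihseen0, ihsome0, ihnone0⟩ := ihq (p - 1).toNat hq0n
      rw [hq0p] at ihseen0 ihsome0 ihnone0
      have hrunnew : pvM (([1, p, x] :: rest).map pvPd)
          = some (max 0 ((pvM (rest.map pvPd)).getD 0)) := by
        simp [pvM, pvPd]
      cases hli0 : pvLastIdx rest p with
      | some j0 =>
        -- person p already seen
        have hseen : PySem.List.pyGetD seen ((p : Int) - 1) false = true := by
          rw [PySem.List.pyGetD_of_nonneg]
          · rw [ihseen0, hli0]; rfl
          · omega
        have hstep : pvBStep (pvM (List.map pvPd rest), seen, final, ib1) [1, p, x]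
            = (some (max 0 ((pvM (rest.map pvPd)).getD 0)), seen, final, ib1) := by
          cases hM : pvM (List.map pvPd rest) with
          | none => simp [pvBStep, hseen]
          | some r => simp [pvBStep, hseen, max_comm]
        rw [hsplit, hstep]
        refine ⟨by rw [hrunnew], ihsl, ihfl, ihil, ?_⟩
        intro q hq
        obtain ⟨ihseen, ihsome, ihnone⟩ := ihq q hq
        by_cases hpq : p = (q : Int) + 1
        · have hcons : pvLastIdx ([1, p, x] :: rest) ((q : Int) + 1) = some (j0 + 1) := by
            rw [pvLastIdx, ← hpq, hli0]
          refine ⟨by rw [ihseen, hcons, ← hpq, hli0]; rfl, ?_, by rw [hcons]; intro h; cases h⟩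
          intro j hj
          rw [hcons] at hj
          injection hj with hj
          subst hj
          have := ihsome j0 (by rw [← hpq]; exact hli0)
          rw [this]; simp
        · have hcons : pvLastIdx ([1, p, x] :: rest) ((q : Int) + 1)
              = match pvLastIdx rest ((q : Int) + 1) with
                | some j => some (j + 1) | none => none := by
            rw [pvLastIdx]
            cases pvLastIdx rest ((q : Int) + 1) with
            | some j => rfl
            | none => simp; omega
          cases hli : pvLastIdx rest ((q : Int) + 1) with
          | some j =>
            rw [hli] at hcons ihseen
            refine ⟨by rw [ihseen, hcons]; rfl, ?_, by rw [hcons]; intro h; cases h⟩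
            intro j' hj'
            rw [hcons] at hj'
            injection hj' with hj'
            subst hj'
            rw [ihsome j hli]; simp
          | none =>
            rw [hli] at hcons ihseen
            refine ⟨by rw [ihseen, hcons], ?_, by intro _; exact ihnone hli⟩
            intro j' hj'
            rw [hcons] at hj'
            cases hj'
      | none =>
        -- first (in reverse) update of person p
        have hseen : PySem.List.pyGetD seen ((p : Int) - 1) false = false := by
          rw [PySem.List.pyGetD_of_nonneg]
          · rw [ihseen0, hli0]; rfl
          · omega
        have hstep : pvBStep (pvM (List.map pvPd rest), seen, final, ib1) [1, p, x]
            = (some (max 0 ((pvM (rest.map pvPd)).getD 0)),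
               PySem.List.pySetD seen ((p:Int) - 1) true,
               PySem.List.pySetD final ((p:Int) - 1) (max x (max 0 ((pvM (rest.map pvPd)).getD 0))),
               PySem.List.pySetD ib1 ((p:Int) - 1) x) := by
          cases hM : pvM (List.map pvPd rest) with
          | none => simp [pvBStep, hseen]
          | some r => simp [pvBStep, hseen, max_comm]
        rw [hsplit, hstep]
        have hsset : PySem.List.pySetD seen ((p:Int) - 1) true = seen.set (p-1).toNat true :=
          PySem.List.pySetD_of_nonneg _ _ (by omega)
        have hfset : PySem.List.pySetD final ((p:Int) - 1) (max x (max 0 ((pvM (rest.map pvPd)).getD 0)))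
            = final.set (p-1).toNat (max x (max 0 ((pvM (rest.map pvPd)).getD 0))) :=
          PySem.List.pySetD_of_nonneg _ _ (by omega)
        have hiset : PySem.List.pySetD ib1 ((p:Int) - 1) x = ib1.set (p-1).toNat x :=
          PySem.List.pySetD_of_nonneg _ _ (by omega)
        refine ⟨by rw [hrunnew], by rw [hsset]; simpa using ihsl,
                by rw [hfset]; simpa using ihfl, by rw [hiset]; simpa using ihil, ?_⟩
        intro q hq
        obtain ⟨ihseen, ihsome, ihnone⟩ := ihq q hq
        by_cases hpq : p = (q : Int) + 1
        · have hq0 : (p - 1).toNat = q := by omega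
          have hcons : pvLastIdx ([1, p, x] :: rest) ((q : Int) + 1) = some 0 := by
            rw [pvLastIdx, ← hpq, hli0]
            simp
          have hqlen : q < seen.length := by rw [ihsl]; omega
          have hqflen : q < final.length := by rw [ihfl]; omega
          refine ⟨?_, ?_, by rw [hcons]; intro h; cases h⟩
          · simp only
            rw [hsset, hq0, getD_set_self _ _ _ _ hqlen, hcons]
            rfl
          · intro j hj
            rw [hcons] at hj
            injection hj with hj
            subst hj
            simp only
            rw [hfset, hq0, getD_set_self _ _ _ _ hqflen]
            simp
        · have hq0 : (p - 1).toNat ≠ q := by omega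
          have hcons : pvLastIdx ([1, p, x] :: rest) ((q : Int) + 1)
              = match pvLastIdx rest ((q : Int) + 1) with
                | some j => some (j + 1) | none => none := by
            rw [pvLastIdx]
            cases pvLastIdx rest ((q : Int) + 1) with
            | some j => rfl
            | none => simp; omega
          refine ⟨?_, ?_, ?_⟩
          · simp only
            rw [hsset, getD_set_ne _ _ _ _ _ (Ne.symm hq0), ihseen, hcons]
            cases pvLastIdx rest ((q : Int) + 1) <;> rfl
          · intro j' hj'
            rw [hcons] at hj'
            cases hli : pvLastIdx rest ((q : Int) + 1) with
            | some j =>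
              rw [hli] at hj'
              injection hj' with hj'
              subst hj'
              simp only
              rw [hfset, getD_set_ne _ _ _ _ _ (Ne.symm hq0), ihsome j hli]
              simp
            | none => rw [hli] at hj'; cases hj'
          · intro hnone
            rw [hcons] at hnone
            cases hli : pvLastIdx rest ((q : Int) + 1) with
            | some j => rw [hli] at hnone; cases hnone
            | none =>
              simp only
              rw [hiset, getD_set_ne _ _ _ _ _ (Ne.symm hq0)]
              exact ihnone hli
    · -- type-2 event e = [t, x] with t ≠ 1
      rcases e with _ | ⟨t, _ | ⟨x, _ | _⟩⟩ <;> simp at hlen2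
      have ht : t ≠ 1 := by simpa using h0
      have hstep : pvBStep (pvM (List.map pvPd rest), seen, final, ib1) [t, x]
          = (some (max x ((pvM (rest.map pvPd)).getD x)), seen, final, ib1) := by
        cases hM : pvM (List.map pvPd rest) with
        | none => simp [pvBStep, ht]
        | some r => simp [pvBStep, ht, max_comm]
      rw [hsplit, hstep]
      have hrunnew : pvM (([t, x] :: rest).map pvPd)
          = some (max x ((pvM (rest.map pvPd)).getD x)) := by
        simp [pvM, pvPd, ht]
      refine ⟨by rw [hrunnew], ihsl, ihfl, ihil, ?_⟩
      intro q hq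
      obtain ⟨ihseen, ihsome, ihnone⟩ := ihq q hq
      have hcons : pvLastIdx ([t, x] :: rest) ((q : Int) + 1)
          = match pvLastIdx rest ((q : Int) + 1) with
            | some j => some (j + 1) | none => none := by
        rw [pvLastIdx]
        cases pvLastIdx rest ((q : Int) + 1) with
        | some j => rfl
        | none => simp [ht]
      refine ⟨?_, ?_, ?_⟩
      · rw [ihseen, hcons]
        cases pvLastIdx rest ((q : Int) + 1) <;> rfl
      · intro j' hj'
        rw [hcons] at hj'
        cases hli : pvLastIdx rest ((q : Int) + 1) with
        | some j =>
          rw [hli] at hj'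
          injection hj' with hj'
          subst hj'
          rw [ihsome j hli]; simp
        | none => rw [hli] at hj'; cases hj'
      · intro hnone
        rw [hcons] at hnone
        cases hli : pvLastIdx rest ((q : Int) + 1) with
        | some j => rw [hli] at hnone; cases hnone
        | none => exact ihnone hli

lemma pvM_drop_at (events : List (List Int)) (j : Nat) (hj : j < events.length)
    (h1 : (events.getD j []).getD 0 0 = 1) :
    (pvM ((events.map pvPd).drop j)).getD 0
      = max 0 ((pvM ((events.drop (j + 1)).map pvPd)).getD 0) := by
  rw [← List.map_drop]
  rw [List.drop_eq_getElem_cons hj]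
  have hget : events[j] = events.getD j [] := (List.getD_eq_getElem events [] hj).symm
  rw [List.map_cons]
  have hpd : pvPd events[j] = 0 := by
    rw [hget]; unfold pvPd; rw [if_pos h1]
  rw [hpd, pvM]
  simp

lemma pvA_eq_spec (n : Int) (ib : List Int) (events : List (List Int))
    (hpre : Pre_calculate_final_balances n ib events) :
    calculate_final_balances n ib events =
      (PySem.List.pyRange 0 n 1).map (fun i => pvSpecAt events ib i.toNat) := by
  obtain ⟨hib, hemp, hwf⟩ := hpre
  have hlu : n ≤ ((List.replicate n.toNat (0:Int)).length : Int) := by simp only [List.length_replicate]; omega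
  have hchar := pvALoop1_char n events 0 ib (List.replicate n.toNat 0) []
      hwf le_rfl hib hlu (by simp)
  obtain ⟨hpd, hq⟩ := hchar
  simp only [List.nil_append] at hpd hq
  rcases hT : pvALoop1 (PySem.List.enumerate events 0)
      (ib, List.replicate n.toNat 0, List.replicate events.length 0) with ⟨ib', lu', pd'⟩
  rw [hT] at hpd hq
  simp only at hpd hq
  subst hpd
  simp only [calculate_final_balances]
  rw [hT]
  simp only
  have hlen : ((events.map pvPd).length : Int) = (events.length : Int) := by simp
  have hloop2 : (PySem.List.pyRange 0 ((events.length : Int) - 1) 1).foldl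
        (pvAStep (events.length : Int)) (events.map pvPd) = pvSmax (events.map pvPd) := by
    have := pvALoop2_eq_smax (events.map pvPd)
    rwa [List.length_map] at this
  rw [hloop2]
  apply List.map_congr_left
  intro i hi
  rw [PySem.List.mem_pyRange_one] at hi
  obtain ⟨hi0, hin⟩ := hi
  have hqi : ((i.toNat : Int)) = i := by omega
  have hqn : ((i.toNat : Int)) < n := by omega
  obtain ⟨hq1, hq2⟩ := hq i.toNat hqn
  rw [PySem.List.pyGetD_of_nonneg _ _ hi0]
  rw [show PySem.List.pyGetD lu' i 0 = lu'.getD i.toNat 0 from PySem.List.pyGetD_of_nonneg _ _ hi0]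
  rw [hqi] at hq1 hq2
  cases hli : pvLastIdx events (i + 1) with
  | some j =>
    rw [hli] at hq1 hq2
    dsimp only at hq1 hq2
    rw [hq1, hq2]
    have hjlen : j < events.length := pvLastIdx_lt hli
    have hj1 : (events.getD j []).getD 0 0 = 1 := pvLastIdx_head1 hli
    rw [show (0:Int) + (j:Int) = (j:Int) by ring]
    rw [PySem.List.pyGetD_of_nonneg _ _ (by omega)]
    rw [show ((j:Int)).toNat = j by omega]
    rw [pvSmax_getD _ j (by simpa using hjlen)]
    rw [pvM_drop_at events j hjlen hj1]
    unfold pvSpecAt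
    rw [hqi, hli]
  | none =>
    rw [hli] at hq1 hq2
    dsimp only at hq1 hq2
    rw [hq1, hq2]
    have hne : events ≠ [] := by
      intro h
      have := hemp h
      omega
    have hlen0 : 0 < (events.map pvPd).length := by
      simp [List.length_pos_iff]
      exact hne
    have hrep : (List.replicate n.toNat (0:Int)).getD i.toNat 0 = 0 := by
      rcases Nat.lt_or_ge i.toNat n.toNat with h | h
      · simp [List.getD, h]
      · rw [List.getD_eq_default]; simpa using h
    rw [hrep]
    rw [PySem.List.pyGetD_of_nonneg _ _ (by omega)]
    rw [show ((0:Int)).toNat = 0 by rfl]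
    rw [pvSmax_getD _ 0 hlen0]
    rw [List.drop_zero]
    unfold pvSpecAt
    rw [hqi, hli]

lemma pvB_eq_spec (n : Int) (ib : List Int) (events : List (List Int))
    (hpre : Pre_calculate_final_balances n ib events) :
    calculate_final_balances_alt n ib events =
      (PySem.List.pyRange 0 n 1).map (fun i => pvSpecAt events ib i.toNat) := by
  obtain ⟨hib, hemp, hwf⟩ := hpre
  obtain ⟨hrun, hsl, hfl, hil, hq⟩ := pvBLoop_char n ib events hwf
  simp only [calculate_final_balances_alt]
  rcases hT : events.reverse.foldl pvBStep
      (none, List.replicate n.toNat false, List.replicate n.toNat 0, ib) with ⟨run, seen, final, ib'⟩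
  rw [hT] at hrun hsl hfl hil hq
  simp only at hrun hsl hfl hil hq
  simp only
  apply List.map_congr_left
  intro i hi
  rw [PySem.List.mem_pyRange_one] at hi
  obtain ⟨hi0, hin⟩ := hi
  have hqi : ((i.toNat : Int)) = i := by omega
  have hqn : ((i.toNat : Int)) < n := by omega
  obtain ⟨hq1, hq2, hq3⟩ := hq i.toNat hqn
  rw [hqi] at hq1 hq2 hq3
  rw [show PySem.List.pyGetD seen i false = seen.getD i.toNat false from PySem.List.pyGetD_of_nonneg _ _ hi0]
  rw [hq1]
  cases hli : pvLastIdx events (i + 1) with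
  | some j =>
    simp only [Option.isSome_some, if_true]
    rw [show PySem.List.pyGetD final i 0 = final.getD i.toNat 0 from PySem.List.pyGetD_of_nonneg _ _ hi0]
    rw [hq2 j hli]
    unfold pvSpecAt
    rw [hqi, hli]
  | none =>
    simp only [Option.isSome_none, Bool.false_eq_true, if_false]
    have hne : events ≠ [] := by
      intro h
      have := hemp h
      omega
    rw [show PySem.List.pyGetD ib' i 0 = ib'.getD i.toNat 0 from PySem.List.pyGetD_of_nonneg _ _ hi0]
    rw [hq3 hli]
    cases hev : events with
    | nil => exact absurd hev hne
    | cons e rest =>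
      have : pvM ((e :: rest).map pvPd)
          = some (max (pvPd e) ((pvM (rest.map pvPd)).getD (pvPd e))) := by
        simp [pvM]
      rw [← hev] at this ⊢
      rw [hrun, this]
      unfold pvSpecAt
      rw [hqi, hli, this]
      simp

-- ===== VERDICT (by name: the statement is the Claim_ definition above) =====
theorem calculate_final_balances_spec : Claim_equal_calculate_final_balances := by
  intro n ib events _ hpre
  unfold Spec_calculate_final_balances
  rw [pvA_eq_spec n ib events hpre, pvB_eq_spec n ib events hpre]
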